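-- pv_equiv track=rewrite | github.com/dfendr/leetcode | analysis/RemoveHighestElement/remove_highest_element.py | removeHighest
-- ===== SOURCE A (Python) =====
-- def removeHighest(arr:list, n):
--     return_arr = []
--     if len(arr) == 0:
--         return return_arr
--     highest = arr[n-1]
--     for i, j in enumerate(arr):
--         if j != highest:
--             return_arr.insert(i, -1)
--     return return_arr
-- ===== SOURCE B (Python) =====
-- def removeHighest(arr: list, n):
--     if not arr:
--         return []
--     highest = arr[n - 1]
--     return [-1] * (len(arr) - arr.count(highest))
-- ===== Notes on version B (the rewrite author's own statement) =====
-- stated objective: simpler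
-- what changed: Replaces the enumerate loop that inserts a -1 at index i for each non-highest element with a single arithmetic construction: count the occurrences of the highest element once and build [-1] * (len(arr) - count) in one step, with no loop over the elements.
import Mathlib
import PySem

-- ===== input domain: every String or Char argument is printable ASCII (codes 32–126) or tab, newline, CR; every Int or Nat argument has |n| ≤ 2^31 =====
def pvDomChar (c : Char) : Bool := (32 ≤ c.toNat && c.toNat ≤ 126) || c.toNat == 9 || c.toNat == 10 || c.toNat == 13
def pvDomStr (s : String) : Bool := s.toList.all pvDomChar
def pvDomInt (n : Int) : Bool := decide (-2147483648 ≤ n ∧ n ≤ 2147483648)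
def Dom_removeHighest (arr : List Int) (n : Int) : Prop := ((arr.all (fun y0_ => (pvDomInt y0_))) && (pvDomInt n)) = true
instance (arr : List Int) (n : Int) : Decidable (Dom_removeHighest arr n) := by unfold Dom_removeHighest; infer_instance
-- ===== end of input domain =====

-- B replaces A's element-by-element enumerate/insert loop by one arithmetic
-- construction [-1] * (len - count highest); objective: simpler.


-- ===== PORT A =====
def removeHighest (arr : List Int) (n : Int) : List Int :=
  if arr.length = 0 then []
  else
    match PySem.List.pyGet? arr (n - 1) with   -- arr[n-1]; none = IndexError, excluded by Pre_
    | none => []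
    | some highest =>
      (PySem.List.enumerate arr 0).foldl
        (fun return_arr ij =>
          if ij.2 ≠ highest then PySem.List.insert return_arr ij.1 (-1) else return_arr)
        []

-- ===== PORT B =====
def removeHighest_alt (arr : List Int) (n : Int) : List Int :=
  match arr with
  | [] => []
  | _ =>
    match PySem.List.pyGet? arr (n - 1) with   -- arr[n-1]; none = IndexError, excluded by Pre_
    | none => []
    | some highest =>
      PySem.List.pyRepeat [(-1 : Int)] ((arr.length : Int) - (PySem.List.count arr highest : Int))

-- ===== PRECONDITION & SPEC =====
-- Pre_ excludes exactly the inputs where Python A raises IndexError on arr[n-1] (non-empty arr, n-1 out of range).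
def Pre_removeHighest (arr : List Int) (n : Int) : Prop :=
  arr = [] ∨ PySem.Raise.InRange arr.length (n - 1)
instance (arr : List Int) (n : Int) : Decidable (Pre_removeHighest arr n) := by
  unfold Pre_removeHighest; infer_instance
def pvWitness_removeHighest : List Int × Int := ([3, 1, 3, 2], 3)

def Spec_removeHighest (arr : List Int) (n : Int) (out : List Int) : Prop := out = removeHighest_alt arr n
instance (arr : List Int) (n : Int) (out : List Int) : Decidable (Spec_removeHighest arr n out) := by unfold Spec_removeHighest; infer_instance

-- ===== CLAIM (what is proved, stated in full; the proofs are below) =====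
def Claim_equal_removeHighest : Prop := ∀ (arr : List Int) (n : Int), Dom_removeHighest arr n → Pre_removeHighest arr n → Spec_removeHighest arr n (removeHighest arr n)

-- ===== LEMMAS AND PROOFS =====

-- list.insert at a position at or past the end appends (Python clamps the position).
lemma insert_ge {α : Type} (xs : List α) (i : Int) (v : α) (h : (xs.length : Int) ≤ i) :
    PySem.List.insert xs i v = xs ++ [v] := by
  have hi : ¬ i < 0 := by omega
  have hmin : min i (xs.length : Int) = (xs.length : Int) := by omega
  simp [PySem.List.insert, PySem.List.sliceIndices, hi, hmin]

-- A's loop invariant: inserting always at/after the end, the fold appends one -1 per element ≠ h.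
lemma loop_eq (h : Int) (xs : List Int) : ∀ (s : Int) (acc : List Int),
    (acc.length : Int) ≤ s →
    (PySem.List.enumerate xs s).foldl
      (fun return_arr ij =>
        if ij.2 ≠ h then PySem.List.insert return_arr ij.1 (-1) else return_arr) acc
    = acc ++ List.replicate (xs.countP (fun x => x ≠ h)) (-1) := by
  induction xs with
  | nil => intro s acc _; simp [PySem.List.enumerate_nil]
  | cons x xs ih =>
    intro s acc hle
    rw [PySem.List.enumerate_cons]
    simp only [List.foldl_cons, List.countP_cons]
    by_cases hx : x ≠ h
    · rw [if_pos hx, insert_ge acc s (-1) hle,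
        ih (s + 1) (acc ++ [-1]) (by simp; omega)]
      simp [hx]
      rw [← List.replicate_succ, List.replicate_succ']
    · rw [if_neg hx, ih (s + 1) acc (by omega)]
      simp [hx]

-- the two counting forms agree: len - count h = countP (· ≠ h)
lemma len_sub_count (xs : List Int) (h : Int) :
    ((xs.length : Int) - (List.count h xs : Int)).toNat = xs.countP (fun x => x ≠ h) := by
  have hc : xs.length = xs.countP (fun x => x == h) + xs.countP (fun x => x ≠ h) := by
    simpa [ne_eq] using List.length_eq_countP_add_countP (fun x => x == h) (l := xs)
  have : List.count h xs = xs.countP (fun x => x == h) := by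
    simp [List.count]
  omega

-- ===== VERDICT (by name: the statement is the Claim_ definition above) =====
theorem removeHighest_spec : Claim_equal_removeHighest := by
  intro arr n _ _
  unfold Spec_removeHighest removeHighest removeHighest_alt
  cases arr with
  | nil => simp
  | cons a tail =>
    rw [if_neg (by simp)]
    cases hg : PySem.List.pyGet? (a :: tail) (n - 1) with
    | none => rfl
    | some highest =>
      dsimp only
      rw [loop_eq highest (a :: tail) 0 [] (by simp), PySem.List.pyRepeat_singleton,
        PySem.List.count_eq, len_sub_count]
      simp
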